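-- pv_equiv track=rewrite | github.com/larshberger/IN2010-Oblig | Oppgave 2 - Bygge balanserte søketrær/oppgave_2a_2.py | print_array
-- ===== SOURCE A (Python) =====
-- def print_array(arr, start, slutt):
--     if start > slutt:
--         return []
--
--     # finner median
--     mid = (start + slutt) // 2
--     current = [arr[mid]]
--
--     # jobber rekursivt med hver sin liste
--     h = print_array(arr, mid + 1, slutt)
--     v = print_array(arr, start, mid - 1)
--
--     # legger sammen listene
--     return current + v + h
-- ===== SOURCE B (Python) =====
-- def print_array(arr, start, slutt):
--     result = []
--     stack = [(start, slutt)]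
--     while stack:
--         s, e = stack.pop()
--         if s > e:
--             continue
--         mid = (s + e) // 2
--         result.append(arr[mid])
--         stack.append((mid + 1, e))
--         stack.append((s, mid - 1))
--     return result
-- ===== Notes on version B (the rewrite author's own statement) =====
-- stated objective: alternative
-- what changed: Replaces the recursion (and its three-list concatenation per call) by an explicit-stack iterative traversal that pops segments and appends each midpoint to a single result list, pushing the right segment before the left.
import Mathlib
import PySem

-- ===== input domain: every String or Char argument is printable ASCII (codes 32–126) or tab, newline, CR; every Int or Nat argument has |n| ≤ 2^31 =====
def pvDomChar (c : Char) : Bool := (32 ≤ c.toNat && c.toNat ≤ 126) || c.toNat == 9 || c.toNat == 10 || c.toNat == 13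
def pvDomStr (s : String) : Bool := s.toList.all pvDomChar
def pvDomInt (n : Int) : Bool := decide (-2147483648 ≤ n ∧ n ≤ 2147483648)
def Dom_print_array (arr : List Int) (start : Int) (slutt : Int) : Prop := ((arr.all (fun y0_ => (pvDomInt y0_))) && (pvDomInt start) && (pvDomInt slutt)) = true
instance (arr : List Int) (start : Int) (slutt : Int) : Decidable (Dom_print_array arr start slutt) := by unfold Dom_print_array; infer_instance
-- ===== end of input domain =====

-- B replaces A's recursion by an explicit-stack iterative traversal (alternative decomposition, same cost class).


-- ===== PORT A =====
-- literal transliteration of A's recursion; the Nat fuel only makes the recursion structural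
-- (fuel = segment length, enough for every recursive call), and arr[mid] is PySem indexing whose
-- .getD 0 fallback is only reached on inputs where the Python raises IndexError (excluded by Pre_).
def printArrayGo (arr : List Int) (fuel : Nat) (s : Int) (e : Int) : List Int :=
  match fuel with
  | 0 => []
  | n + 1 =>
    if s > e then []
    else
      let mid := PySem.Int.floordiv (s + e) 2
      let current := [(PySem.List.pyGet? arr mid).getD 0]
      let h := printArrayGo arr n (mid + 1) e
      let v := printArrayGo arr n s (mid - 1)
      current ++ v ++ h

def print_array (arr : List Int) (start : Int) (slutt : Int) : List Int :=
  printArrayGo arr (slutt + 1 - start).toNat start slutt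

-- ===== PORT B =====
-- the while-loop of Source B; the stack's head is its top (list.pop pops the last pushed);
-- the Nat fuel only makes the loop structural (each iteration consumes one unit, and
-- 2·segment-length + 1 units always suffice).
def pvAltLoop (arr : List Int) (fuel : Nat) (result : List Int) (stack : List (Int × Int)) : List Int :=
  match fuel with
  | 0 => result
  | n + 1 =>
    match stack with
    | [] => result
    | (s, e) :: rest =>
      if s > e then pvAltLoop arr n result rest
      else
        let mid := PySem.Int.floordiv (s + e) 2
        pvAltLoop arr n (result ++ [(PySem.List.pyGet? arr mid).getD 0])
          ((s, mid - 1) :: (mid + 1, e) :: rest)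

def print_array_alt (arr : List Int) (start : Int) (slutt : Int) : List Int :=
  pvAltLoop arr (2 * (slutt + 1 - start).toNat + 1) [] [(start, slutt)]

-- ===== PRECONDITION & SPEC =====
-- Pre_ excludes exactly the inputs on which the Python A raises IndexError
-- (some visited index of [start, slutt] is out of range for arr).
def Pre_print_array (arr : List Int) (start : Int) (slutt : Int) : Prop :=
  start > slutt ∨ (-(arr.length : Int) ≤ start ∧ slutt < (arr.length : Int))
instance (arr : List Int) (start : Int) (slutt : Int) : Decidable (Pre_print_array arr start slutt) := by unfold Pre_print_array; infer_instance
def pvWitness_print_array : List Int × Int × Int := ([3, 1, 4, 1, 5], 0, 4)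

def Spec_print_array (arr : List Int) (start : Int) (slutt : Int) (out : List Int) : Prop := out = print_array_alt arr start slutt
instance (arr : List Int) (start : Int) (slutt : Int) (out : List Int) : Decidable (Spec_print_array arr start slutt out) := by unfold Spec_print_array; infer_instance

-- ===== CLAIM (what is proved, stated in full; the proofs are below) =====
def Claim_equal_print_array : Prop := ∀ (arr : List Int) (start : Int) (slutt : Int), Dom_print_array arr start slutt → Pre_print_array arr start slutt → Spec_print_array arr start slutt (print_array arr start slutt)

-- ===== LEMMAS AND PROOFS =====

-- any sufficient fuel computes the same tree traversal
lemma printArrayGo_fuel (arr : List Int) :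
    ∀ (n m : Nat) (s e : Int), (e + 1 - s).toNat ≤ n → (e + 1 - s).toNat ≤ m →
      printArrayGo arr n s e = printArrayGo arr m s e := by
  intro n
  induction n with
  | zero =>
    intro m s e hn _
    have hse : s > e := by omega
    cases m with
    | zero => rfl
    | succ m => simp [printArrayGo, hse]
  | succ n ih =>
    intro m s e hn hm
    by_cases hse : s > e
    · cases m with
      | zero => simp [printArrayGo, hse]
      | succ m => simp [printArrayGo, hse]
    · cases m with
      | zero => omega
      | succ m =>
        have hmid := PySem.Int.floordiv_two_mid_bounds (lo := s) (hi := e) (by omega)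
        simp only [printArrayGo, if_neg hse]
        rw [ih m (PySem.Int.floordiv (s + e) 2 + 1) e (by omega) (by omega),
            ih m s (PySem.Int.floordiv (s + e) 2 - 1) (by omega) (by omega)]

-- with exact fuel, one non-empty step of A's recursion
lemma print_array_step (arr : List Int) (s e : Int) (h : ¬ s > e) :
    print_array arr s e
      = [(PySem.List.pyGet? arr (PySem.Int.floordiv (s + e) 2)).getD 0]
        ++ print_array arr s (PySem.Int.floordiv (s + e) 2 - 1)
        ++ print_array arr (PySem.Int.floordiv (s + e) 2 + 1) e := by
  have hmid := PySem.Int.floordiv_two_mid_bounds (lo := s) (hi := e) (by omega)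
  have hpos : (e + 1 - s).toNat = (e - s).toNat + 1 := by omega
  unfold print_array
  rw [hpos]
  simp only [printArrayGo, if_neg h]
  rw [printArrayGo_fuel arr (e - s).toNat ((e + 1 - (PySem.Int.floordiv (s + e) 2 + 1)).toNat)
        (PySem.Int.floordiv (s + e) 2 + 1) e (by omega) (by omega),
      printArrayGo_fuel arr (e - s).toNat ((PySem.Int.floordiv (s + e) 2 - 1 + 1 - s).toNat)
        s (PySem.Int.floordiv (s + e) 2 - 1) (by omega) (by omega)]

lemma print_array_empty (arr : List Int) (s e : Int) (h : s > e) :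
    print_array arr s e = [] := by
  have : (e + 1 - s).toNat = 0 := by omega
  unfold print_array
  rw [this]
  rfl

-- loop invariant: given enough fuel, the stack holds pending segments and the loop
-- emits A's output for each of them, in order
lemma pvAltLoop_eq (arr : List Int) :
    ∀ (fuel : Nat) (result : List Int) (stack : List (Int × Int)),
      2 * (stack.map (fun p => (p.2 + 1 - p.1).toNat)).sum + stack.length ≤ fuel →
      pvAltLoop arr fuel result stack
        = result ++ (stack.map (fun p => print_array arr p.1 p.2)).flatten := by
  intro fuel
  induction fuel with
  | zero =>
    intro result stack hf
    have : stack = [] := by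
      cases stack with
      | nil => rfl
      | cons p rest => simp at hf
    subst this
    simp [pvAltLoop]
  | succ n ih =>
    intro result stack hf
    match stack with
    | [] => simp [pvAltLoop]
    | (s, e) :: rest =>
      simp only [List.map_cons, List.sum_cons, List.length_cons] at hf
      by_cases hse : s > e
      · simp only [pvAltLoop, if_pos hse]
        rw [ih result rest (by omega)]
        simp [print_array_empty arr s e hse]
      · have hmid := PySem.Int.floordiv_two_mid_bounds (lo := s) (hi := e) (by omega)
        simp only [pvAltLoop, if_neg hse]
        rw [ih _ _ (by simp only [List.map_cons, List.sum_cons, List.length_cons]; omega)]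
        simp only [List.map_cons, List.flatten_cons]
        rw [print_array_step arr s e hse]
        simp

-- ===== VERDICT (by name: the statement is the Claim_ definition above) =====
theorem print_array_spec : Claim_equal_print_array := by
  intro arr start slutt _ _
  unfold Spec_print_array print_array_alt
  rw [pvAltLoop_eq arr _ _ _ (by simp)]
  simp
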